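-- pv_equiv track=rewrite | github.com/liupengsay/PyIsTheBestLang | src/dp/digital_dp/problem.py | lc_2827_1
-- ===== SOURCE A (Python) =====
-- from functools import lru_cache
--
-- def lc_2827_1(low: int, high: int, k: int) -> int:
--     """
--     url: https://leetcode.cn/problems/number-of-beautiful-integers-in-the-range/
--     tag: digital_dp|inclusion_exclusion
--     """
--
--     def check(num):
--         @lru_cache(None)
--         def dfs(i, is_limit, is_num, odd, rest):
--             if i == n:
--                 return 1 if is_num and not odd and not rest else 0
--             res = 0
--             if not is_num:
--                 res += dfs(i + 1, False, 0, 0, 0)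
--
--             floor = 0 if is_num else 1
--             ceil = int(s[i]) if is_limit else 9
--             for x in range(floor, ceil + 1):
--                 res += dfs(i + 1, is_limit and ceil == x, 1, odd + 1 if x % 2 == 0 else odd - 1,
--                            (rest * 10 + x) % k)
--             return res
--
--         s = str(num)
--         n = len(s)
--         return dfs(0, True, 0, 0, 0)
--
--     return check(high) - check(low - 1)
-- ===== SOURCE B (Python) =====
-- def lc_2827_1(low: int, high: int, k: int) -> int:
--     """Iterative forward digit DP: sweep the digit positions of the bound keeping a
--     table dp[(balance, remainder)] -> count of started prefixes strictly below the
--     bound (plus the numbers that start later, i.e. are shorter), instead of A's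
--     recursion with lru_cache."""
--
--     def bal(d):
--         return 1 if d % 2 == 0 else -1
--
--     def check(num):
--         if num == 0:
--             return 0
--         s = [int(c) for c in str(num)]
--         n = len(s)
--         dp = {}
--
--         def add(table, key, c):
--             table[key] = table.get(key, 0) + c
--
--         # length-n numbers whose first digit is already below the bound's
--         for d in range(1, s[0]):
--             add(dp, (bal(d), d % k), 1)
--         b, r = bal(s[0]), s[0] % k
--         for i in range(1, n):
--             ndp = {}
--             # every started prefix extends by an arbitrary digit
--             for (bb, rr), c in dp.items():
--                 for d in range(10):
--                     add(ndp, (bb + bal(d), (rr * 10 + d) % k), c)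
--             # numbers shorter than n start here with a nonzero digit
--             for d in range(1, 10):
--                 add(ndp, (bal(d), d % k), 1)
--             # the tight prefix goes strictly below the bound at position i
--             for d in range(s[i]):
--                 add(ndp, (b + bal(d), (r * 10 + d) % k), 1)
--             b, r = b + bal(s[i]), (r * 10 + s[i]) % k
--             dp = ndp
--         res = dp.get((0, 0), 0)
--         if b == 0 and r == 0:
--             res += 1
--         return res
--
--     return check(high) - check(low - 1)
-- ===== Notes on version B (the rewrite author's own statement) =====
-- stated objective: alternative
-- what changed: Replaces A's top-down lru_cache recursion over (position, tight, started, balance, remainder) with an iterative forward digit sweep that keeps one dict mapping (parity balance, remainder mod k) to the count of started prefixes already strictly below the bound, handling shorter numbers and the tight prefix explicitly per position.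
import Mathlib
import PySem

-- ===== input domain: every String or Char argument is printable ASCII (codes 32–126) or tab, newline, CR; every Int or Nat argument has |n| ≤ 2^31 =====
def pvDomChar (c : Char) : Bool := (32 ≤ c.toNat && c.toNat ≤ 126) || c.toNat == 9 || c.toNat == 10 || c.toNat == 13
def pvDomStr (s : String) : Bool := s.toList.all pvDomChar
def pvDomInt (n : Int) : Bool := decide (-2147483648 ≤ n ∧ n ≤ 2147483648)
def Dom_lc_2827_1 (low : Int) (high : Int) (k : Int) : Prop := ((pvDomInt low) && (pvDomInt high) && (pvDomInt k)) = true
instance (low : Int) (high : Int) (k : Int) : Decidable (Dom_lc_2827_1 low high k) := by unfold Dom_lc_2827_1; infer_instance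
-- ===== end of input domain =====

-- B re-implements A's memoized recursive digit DP as an iterative forward sweep over the
-- digit positions with a (balance, remainder) -> count table; same return value on Pre_.

-- ===== PORT A =====
-- int(c) for the decimal digit characters that str(num) yields on num ≥ 0 (exact there)
def pvDigit (c : Char) : Int := (c.toNat : Int) - 48
-- the digit list str(num) both Pythons read off a bound (A via s[i], B via a comprehension)
def pvDigits (num : Int) : List Int := (PySem.Int.toChars num).map pvDigit

-- the lru_cache key (i, is_limit, is_num, odd, rest) of A's dfs
abbrev MKey : Type := Nat × Bool × Bool × Int × Int

-- dfs of A, recursing on the remaining digits (suf = s[i:]), with lru_cache ported as an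
-- explicit memo table threaded through the recursion
def dfsA (k : Int) : List Int → Nat → Bool → Bool → Int → Int →
    Std.HashMap MKey Int → (Int × Std.HashMap MKey Int)
  | suf, i, isLimit, isNum, odd, rest, memo =>
    match memo[((i, isLimit, isNum, odd, rest) : MKey)]? with
    | some v => (v, memo)
    | none =>
      let rm :=
        match suf with
        | [] => ((if isNum && odd == 0 && rest == 0 then (1 : Int) else 0), memo)
        | c :: tl =>
          let st0 := if !isNum then dfsA k tl (i + 1) false false 0 0 memo else (0, memo)
          let floor : Int := if isNum then 0 else 1
          let ceil : Int := if isLimit then c else 9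
          (PySem.List.pyRange floor (ceil + 1) 1).foldl
            (fun st x =>
              let p := dfsA k tl (i + 1) (isLimit && (ceil == x)) true
                  (if PySem.Int.mod x 2 == 0 then odd + 1 else odd - 1)
                  (PySem.Int.mod (rest * 10 + x) k) st.2
              (st.1 + p.1, p.2)) st0
      (rm.1, rm.2.insert (i, isLimit, isNum, odd, rest) rm.1)

def checkA (k : Int) (num : Int) : Int :=
  (dfsA k (pvDigits num) 0 true false 0 0 ∅).1

def lc_2827_1 (low : Int) (high : Int) (k : Int) : Int := checkA k high - checkA k (low - 1)

-- ===== PORT B =====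
-- bal(d) of Source B
def pvBal (d : Int) : Int := if PySem.Int.mod d 2 == 0 then 1 else -1
-- add(table, key, c) of Source B
def pvAdd (t : PySem.Dict (Int × Int) Int) (key : Int × Int) (c : Int) : PySem.Dict (Int × Int) Int :=
  t.insert key (t.getD key 0 + c)
-- the body of Source B's `for i in range(1, n)` loop (state: dp table, tight balance b, tight remainder r)
def stepB (k : Int) (st : PySem.Dict (Int × Int) Int × Int × Int) (si : Int) :
    PySem.Dict (Int × Int) Int × Int × Int :=
  let dp := st.1
  let b := st.2.1
  let r := st.2.2
  let ndp := dp.items.foldl (fun t p =>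
      (PySem.List.pyRange 0 10 1).foldl
        (fun t d => pvAdd t (p.1.1 + pvBal d, PySem.Int.mod (p.1.2 * 10 + d) k) p.2) t)
    PySem.Dict.empty
  let ndp := (PySem.List.pyRange 1 10 1).foldl
    (fun t d => pvAdd t (pvBal d, PySem.Int.mod d k) 1) ndp
  let ndp := (PySem.List.pyRange 0 si 1).foldl
    (fun t d => pvAdd t (b + pvBal d, PySem.Int.mod (r * 10 + d) k) 1) ndp
  (ndp, b + pvBal si, PySem.Int.mod (r * 10 + si) k)

def checkB (k : Int) (num : Int) : Int :=
  if num == 0 then 0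
  else match pvDigits num with
  | [] => 0   -- unreachable: str(num) is never empty
  | s0 :: stl =>
    let dp : PySem.Dict (Int × Int) Int :=
      (PySem.List.pyRange 1 s0 1).foldl
        (fun t d => pvAdd t (pvBal d, PySem.Int.mod d k) 1) PySem.Dict.empty
    let st := stl.foldl (stepB k) (dp, pvBal s0, PySem.Int.mod s0 k)
    let res := st.1.getD (0, 0) 0
    if st.2.1 == 0 && st.2.2 == 0 then res + 1 else res

def lc_2827_1_alt (low : Int) (high : Int) (k : Int) : Int := checkB k high - checkB k (low - 1)

-- ===== PRECONDITION & SPEC =====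
-- Pre_ excludes exactly the inputs on which Python A raises: ValueError (int('-')) when
-- low ≤ 0 or high < 0, and ZeroDivisionError when k = 0 — except the single point
-- (low, high, k) = (1, 0, 0), where A's digit ranges are all empty, no '% k' is ever
-- reached, and A returns 0; that point stays inside Pre_.
def Pre_lc_2827_1 (low : Int) (high : Int) (k : Int) : Prop :=
  1 ≤ low ∧ 0 ≤ high ∧ (k ≠ 0 ∨ (low = 1 ∧ high = 0))
instance (low : Int) (high : Int) (k : Int) : Decidable (Pre_lc_2827_1 low high k) := by
  unfold Pre_lc_2827_1; infer_instance

def pvWitness_lc_2827_1 : Int × Int × Int := (1, 20, 3)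

def Spec_lc_2827_1 (low : Int) (high : Int) (k : Int) (out : Int) : Prop := out = lc_2827_1_alt low high k
instance (low : Int) (high : Int) (k : Int) (out : Int) : Decidable (Spec_lc_2827_1 low high k out) := by
  unfold Spec_lc_2827_1; infer_instance

-- ===== CLAIM (what is proved, stated in full; the proofs are below) =====
def Claim_equal_lc_2827_1 : Prop := ∀ (low : Int) (high : Int) (k : Int), Dom_lc_2827_1 low high k → Pre_lc_2827_1 low high k → Spec_lc_2827_1 low high k (lc_2827_1 low high k)

-- ===== LEMMAS AND PROOFS =====

-- A's dfs without the memo table (proof-side reference implementation)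
def dfsP (k : Int) : List Int → Bool → Bool → Int → Int → Int
  | [], _, isNum, odd, rest => if isNum && odd == 0 && rest == 0 then 1 else 0
  | c :: tl, isLimit, isNum, odd, rest =>
    let res : Int := if !isNum then dfsP k tl false false 0 0 else 0
    let floor : Int := if isNum then 0 else 1
    let ceil : Int := if isLimit then c else 9
    (PySem.List.pyRange floor (ceil + 1) 1).foldl
      (fun acc x => acc + dfsP k tl (isLimit && (ceil == x)) true
          (if PySem.Int.mod x 2 == 0 then odd + 1 else odd - 1)
          (PySem.Int.mod (rest * 10 + x) k)) res

-- every value stored in the memo table is the value of the pure dfs at its key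
def MGood (k : Int) (s : List Int) (m : Std.HashMap MKey Int) : Prop :=
  ∀ (key : MKey) (v : Int), m[key]? = some v →
    v = dfsP k (s.drop key.1) key.2.1 key.2.2.1 key.2.2.2.1 key.2.2.2.2

lemma MGood_insert (k : Int) (s : List Int) (m : Std.HashMap MKey Int)
    (key0 : MKey) (res : Int) (hgood : MGood k s m)
    (hres : res = dfsP k (s.drop key0.1) key0.2.1 key0.2.2.1 key0.2.2.2.1 key0.2.2.2.2) :
    MGood k s (m.insert key0 res) := by
  intro key v hv
  rw [Std.HashMap.getElem?_insert] at hv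
  split at hv
  · next hbeq =>
    obtain rfl : key0 = key := eq_of_beq hbeq
    obtain rfl : res = v := by injection hv
    exact hres
  · exact hgood key v hv

lemma dfsA_eq_dfsP (k : Int) (s : List Int) : ∀ (suf : List Int) (i : Nat), suf = s.drop i →
    ∀ (l n : Bool) (o r : Int) (memo : Std.HashMap MKey Int), MGood k s memo →
      (dfsA k suf i l n o r memo).1 = dfsP k suf l n o r ∧
        MGood k s (dfsA k suf i l n o r memo).2 := by
  intro suf
  induction suf with
  | nil =>
    intro i hsuf l n o r memo hgood
    rw [dfsA]
    cases hlook : memo[((i, l, n, o, r) : MKey)]? with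
    | some v =>
      refine ⟨?_, hgood⟩
      have := hgood (i, l, n, o, r) v hlook
      rw [this, ← hsuf]
    | none =>
      refine ⟨rfl, ?_⟩
      exact MGood_insert k s memo (i, l, n, o, r) _ hgood (by rw [← hsuf]; rfl)
  | cons c tl ih =>
    intro i hsuf l n o r memo hgood
    have hdrop : tl = s.drop (i + 1) := by
      have := congrArg List.tail hsuf
      simpa [List.tail_drop] using this
    have inner : ∀ (g1 : Int → Bool) (g2 g3 : Int → Int) (xs : List Int) (a : Int)
        (m : Std.HashMap MKey Int), MGood k s m →
        ((xs.foldl (fun st x =>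
            let p := dfsA k tl (i + 1) (g1 x) true (g2 x) (g3 x) st.2
            (st.1 + p.1, p.2)) (a, m)).1
          = xs.foldl (fun acc x => acc + dfsP k tl (g1 x) true (g2 x) (g3 x)) a)
        ∧ MGood k s ((xs.foldl (fun st x =>
            let p := dfsA k tl (i + 1) (g1 x) true (g2 x) (g3 x) st.2
            (st.1 + p.1, p.2)) (a, m)).2) := by
      intro g1 g2 g3 xs
      induction xs with
      | nil => intro a m hm; exact ⟨rfl, hm⟩
      | cons x xs ihx =>
        intro a m hm
        simp only [List.foldl_cons]
        obtain ⟨hx1, hx2⟩ := ih (i + 1) hdrop (g1 x) true (g2 x) (g3 x) m hm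
        obtain ⟨hy1, hy2⟩ := ihx (a + (dfsA k tl (i + 1) (g1 x) true (g2 x) (g3 x) m).1)
          (dfsA k tl (i + 1) (g1 x) true (g2 x) (g3 x) m).2 hx2
        exact ⟨by rw [hy1, hx1], hy2⟩
    rw [dfsA]
    cases hlook : memo[((i, l, n, o, r) : MKey)]? with
    | some v =>
      refine ⟨?_, hgood⟩
      have := hgood (i, l, n, o, r) v hlook
      rw [this, ← hsuf]
    | none =>
      cases n with
      | true =>
        obtain ⟨h1, h2⟩ := inner
          (fun x => l && ((if l then c else 9) == x))
          (fun x => if PySem.Int.mod x 2 == 0 then o + 1 else o - 1)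
          (fun x => PySem.Int.mod (r * 10 + x) k)
          (PySem.List.pyRange (if (true : Bool) then 0 else 1) ((if l then c else 9) + 1) 1)
          0 memo hgood
        refine ⟨by rw [dfsP]; exact h1, ?_⟩
        refine MGood_insert k s _ (i, l, true, o, r) _ h2 ?_
        dsimp only
        rw [← hsuf, dfsP]
        exact h1
      | false =>
        obtain ⟨h01, h02⟩ := ih (i + 1) hdrop false false 0 0 memo hgood
        obtain ⟨h1, h2⟩ := inner
          (fun x => l && ((if l then c else 9) == x))
          (fun x => if PySem.Int.mod x 2 == 0 then o + 1 else o - 1)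
          (fun x => PySem.Int.mod (r * 10 + x) k)
          (PySem.List.pyRange (if (false : Bool) then 0 else 1) ((if l then c else 9) + 1) 1)
          (dfsA k tl (i + 1) false false 0 0 memo).1
          (dfsA k tl (i + 1) false false 0 0 memo).2 h02
        refine ⟨?_, ?_⟩
        · rw [dfsP]
          simp only [Bool.not_false, if_true]
          rw [← h01]
          exact h1
        · refine MGood_insert k s _ (i, l, false, o, r) _ h2 ?_
          dsimp only
          rw [← hsuf, dfsP]
          simp only [Bool.not_false, if_true]
          rw [← h01]
          exact h1

lemma checkA_eq_dfsP (k num : Int) :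
    checkA k num = dfsP k (pvDigits num) true false 0 0 := by
  have h := dfsA_eq_dfsP k (pvDigits num) (pvDigits num) 0 rfl true false 0 0 ∅
    (by intro key v hv; simp at hv)
  exact h.1


-- completions: Nfun k j b r = number of ways to append j free digits to a prefix with
-- parity balance b and remainder r so that the final balance and remainder are 0
def Nfun (k : Int) : Nat → Int → Int → Int
  | 0, b, r => if b = 0 ∧ r = 0 then 1 else 0
  | j + 1, b, r =>
    ((PySem.List.pyRange 0 10 1).map
      (fun d => Nfun k j (b + pvBal d) (PySem.Int.mod (r * 10 + d) k))).sum

-- beautiful numbers with fewer than j digits (A's is_num-skip chain)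
def Sfun (k : Int) : Nat → Int
  | 0 => 0
  | j + 1 => Sfun k j +
      ((PySem.List.pyRange 1 10 1).map
        (fun d => Nfun k j (pvBal d) (PySem.Int.mod d k))).sum

-- weight of a table against a completion function
def Wd (dp : PySem.Dict (Int × Int) Int) (f : Int × Int → Int) : Int :=
  (dp.items.map (fun p => p.2 * f p.1)).sum

lemma oddUpd (b x : Int) : (if 2 ∣ x then b + 1 else b - 1) = b + pvBal x := by
  simp only [pvBal, beq_iff_eq, PySem.Int.mod_eq_zero_iff_dvd]
  split <;> ring

lemma pvBal_dvd (x : Int) : (if 2 ∣ x then (1 : Int) else -1) = pvBal x := by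
  have := oddUpd 0 x; simpa using this

lemma dfsP_free (k : Int) : ∀ (tl : List Int) (b r : Int),
    dfsP k tl false true b r = Nfun k tl.length b r := by
  intro tl
  induction tl with
  | nil => intro b r; simp [dfsP, Nfun]
  | cons c tl ih =>
    intro b r
    simp only [dfsP]; norm_num
    rw [PySem.List.foldl_add]
    simp only [Nfun]
    rw [List.map_congr_left (fun x _ => by rw [oddUpd, ih])]
    simp

lemma dfsP_skip (k : Int) : ∀ (tl : List Int),
    dfsP k tl false false 0 0 = Sfun k tl.length := by
  intro tl
  induction tl with
  | nil => simp [dfsP, Sfun]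
  | cons c tl ih =>
    simp only [dfsP]; norm_num
    rw [PySem.List.foldl_add]
    simp only [Sfun, ih]
    refine congrArg (fun z => Sfun k tl.length + z)
      (congrArg List.sum (List.map_congr_left (fun x _ => ?_)))
    rw [pvBal_dvd, dfsP_free]

lemma dfsP_tight (k : Int) (c : Int) (tl : List Int) (b r : Int) (hc : 0 ≤ c) :
    dfsP k (c :: tl) true true b r =
      ((PySem.List.pyRange 0 c 1).map
        (fun d => Nfun k tl.length (b + pvBal d) (PySem.Int.mod (r * 10 + d) k))).sum
      + dfsP k tl true true (b + pvBal c) (PySem.Int.mod (r * 10 + c) k) := by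
  simp only [dfsP]; norm_num
  rw [PySem.List.pyRange_one_succ_right hc]
  simp only [List.foldl_append, List.foldl_cons, List.foldl_nil]
  have hcon := PySem.List.foldl_congr_mem
    (l := PySem.List.pyRange 0 c 1) (init := (0 : Int))
    (f := fun acc x => acc + dfsP k tl (c == x) true (if 2 ∣ x then b + 1 else b - 1)
      (PySem.Int.mod (r * 10 + x) k))
    (g := fun acc x => acc + Nfun k tl.length (b + pvBal x) (PySem.Int.mod (r * 10 + x) k))
    (by
      intro acc x hx
      have hlt : x < c := (PySem.List.mem_pyRange_one.mp hx).2
      have hne : (c == x) = false := by simp; omega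
      dsimp only
      rw [hne, oddUpd, dfsP_free])
  rw [hcon, PySem.List.foldl_add]
  have hself : (c == c) = true := beq_self_eq_true c
  rw [hself, oddUpd]
  ring_nf

lemma dfsP_top (k : Int) (c0 : Int) (tl : List Int) (h1 : 1 ≤ c0) :
    dfsP k (c0 :: tl) true false 0 0 =
      Sfun k tl.length
      + ((PySem.List.pyRange 1 c0 1).map
          (fun d => Nfun k tl.length (pvBal d) (PySem.Int.mod d k))).sum
      + dfsP k tl true true (pvBal c0) (PySem.Int.mod c0 k) := by
  simp only [dfsP]; norm_num
  rw [PySem.List.pyRange_one_succ_right h1]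
  simp only [List.foldl_append, List.foldl_cons, List.foldl_nil]
  have hcon := PySem.List.foldl_congr_mem
    (l := PySem.List.pyRange 1 c0 1) (init := dfsP k tl false false 0 0)
    (f := fun acc x => acc + dfsP k tl (c0 == x) true (if 2 ∣ x then 1 else -1)
      (PySem.Int.mod x k))
    (g := fun acc x => acc + Nfun k tl.length (pvBal x) (PySem.Int.mod x k))
    (by
      intro acc x hx
      have hlt : x < c0 := (PySem.List.mem_pyRange_one.mp hx).2
      have hne : (c0 == x) = false := by simp; omega
      dsimp only
      rw [hne, pvBal_dvd, dfsP_free])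
  rw [hcon, PySem.List.foldl_add]
  have hself : (c0 == c0) = true := beq_self_eq_true c0
  rw [hself, pvBal_dvd, dfsP_skip]

lemma Wd_empty (f : (Int × Int) → Int) : Wd PySem.Dict.empty f = 0 := by
  rfl

lemma sum_map_replace (l : List ((Int × Int) × Int)) (key : Int × Int) (w : Int)
    (f : Int × Int → Int) (hnd : (l.map Prod.fst).Nodup) (v0 : Int) (hv : (key, v0) ∈ l) :
    ((l.map (fun p => if p.1 == key then (key, w) else p)).map (fun p => p.2 * f p.1)).sum
      = (l.map (fun p => p.2 * f p.1)).sum - v0 * f key + w * f key := by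
  induction l with
  | nil => simp at hv
  | cons p l ih =>
    simp only [List.map_cons, List.nodup_cons, List.mem_map] at hnd
    rcases List.mem_cons.mp hv with heq | hmem
    · subst heq
      simp only [List.map_cons, beq_self_eq_true, if_true, List.sum_cons]
      have hid : l.map (fun p => if p.1 == key then (key, w) else p) = l.map id := by
        refine List.map_congr_left (fun q hq => ?_)
        have : q.1 ≠ key := by
          intro h; exact hnd.1 ⟨q, hq, h⟩
        simp [this]
      rw [hid, List.map_id]; ring
    · have hp : p.1 ≠ key := by
        intro h
        exact hnd.1 ⟨(key, v0), hmem, by rw [h]⟩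
      simp only [List.map_cons, List.sum_cons]
      rw [if_neg (by simp [hp])]
      rw [ih hnd.2 hmem]
      ring

lemma Wd_pvAdd (dp : PySem.Dict (Int × Int) Int) (key : Int × Int) (c : Int)
    (f : Int × Int → Int) (hnd : dp.keys.Nodup) :
    Wd (pvAdd dp key c) f = Wd dp f + c * f key := by
  unfold pvAdd Wd
  by_cases h : dp.contains key = true
  · obtain ⟨v0, hv0⟩ : ∃ v0, dp.get? key = some v0 := by
      have := PySem.Dict.contains_eq_isSome_get? (d := dp) (k := key)
      rw [h] at this
      exact Option.isSome_iff_exists.mp this.symm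
    have hgd : dp.getD key 0 = v0 := PySem.Dict.getD_of_get?_eq_some dp 0 hv0
    have hmem : (key, v0) ∈ dp.items := PySem.Dict.mem_items_of_get?_eq_some dp hv0
    rw [PySem.Dict.items_insert_of_contains dp _ h, hgd]
    have hnd' : (dp.items.map Prod.fst).Nodup := by
      simpa [PySem.Dict.keys] using hnd
    rw [sum_map_replace dp.items key (v0 + c) f hnd' v0 hmem]
    ring
  · rw [PySem.Dict.items_insert_of_not_contains dp _ (by simpa using h)]
    rw [PySem.Dict.getD_of_not_contains dp 0 (by simpa using h)]
    simp [List.sum_append]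

lemma nodup_pvAdd (dp : PySem.Dict (Int × Int) Int) (key : Int × Int) (c : Int)
    (hnd : dp.keys.Nodup) : (pvAdd dp key c).keys.Nodup := by
  exact PySem.Dict.nodup_keys_insert _ _ _ hnd

lemma nodup_foldl_pvAdd {α : Type} (l : List α) {g : α → Int × Int} {c : α → Int}
    (dp : PySem.Dict (Int × Int) Int) (hnd : dp.keys.Nodup) :
    (l.foldl (fun t x => pvAdd t (g x) (c x)) dp).keys.Nodup := by
  simp only [pvAdd]
  exact PySem.Dict.nodup_keys_foldl_insert_key l g (fun t x => t.getD (g x) 0 + c x) dp hnd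

lemma Wd_foldl_pvAdd {α : Type} (l : List α) {g : α → Int × Int} {c : α → Int}
    (dp : PySem.Dict (Int × Int) Int) (hnd : dp.keys.Nodup) (f : Int × Int → Int) :
    Wd (l.foldl (fun t x => pvAdd t (g x) (c x)) dp) f
      = Wd dp f + (l.map (fun x => c x * f (g x))).sum := by
  induction l generalizing dp with
  | nil => simp
  | cons x l ih =>
    simp only [List.foldl_cons, List.map_cons, List.sum_cons]
    rw [ih (pvAdd dp (g x) (c x)) (nodup_pvAdd dp (g x) (c x) hnd), Wd_pvAdd dp (g x) (c x) f hnd]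
    ring

lemma nodup_extend (k : Int) (ps : List ((Int × Int) × Int))
    (ndp : PySem.Dict (Int × Int) Int) (hnd : ndp.keys.Nodup) :
    (ps.foldl (fun t p =>
      (PySem.List.pyRange 0 10 1).foldl
        (fun t d => pvAdd t (p.1.1 + pvBal d, PySem.Int.mod (p.1.2 * 10 + d) k) p.2) t)
      ndp).keys.Nodup := by
  induction ps generalizing ndp with
  | nil => simpa using hnd
  | cons p ps ih =>
    simp only [List.foldl_cons]
    exact ih _ (nodup_foldl_pvAdd (g := fun d => (p.1.1 + pvBal d, PySem.Int.mod (p.1.2 * 10 + d) k))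
      (c := fun _ => p.2) (PySem.List.pyRange 0 10 1) ndp hnd)

lemma Wd_extend (k : Int) (j : Nat) (ps : List ((Int × Int) × Int))
    (ndp : PySem.Dict (Int × Int) Int) (hnd : ndp.keys.Nodup) :
    Wd (ps.foldl (fun t p =>
        (PySem.List.pyRange 0 10 1).foldl
          (fun t d => pvAdd t (p.1.1 + pvBal d, PySem.Int.mod (p.1.2 * 10 + d) k) p.2) t)
      ndp) (fun key => Nfun k j key.1 key.2)
      = Wd ndp (fun key => Nfun k j key.1 key.2)
        + (ps.map (fun p => p.2 * Nfun k (j + 1) p.1.1 p.1.2)).sum := by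
  induction ps generalizing ndp with
  | nil => simp
  | cons p ps ih =>
    simp only [List.foldl_cons, List.map_cons, List.sum_cons]
    rw [ih _ (nodup_foldl_pvAdd (g := fun d => (p.1.1 + pvBal d, PySem.Int.mod (p.1.2 * 10 + d) k))
      (c := fun _ => p.2) (PySem.List.pyRange 0 10 1) ndp hnd)]
    rw [Wd_foldl_pvAdd (g := fun d => (p.1.1 + pvBal d, PySem.Int.mod (p.1.2 * 10 + d) k))
      (c := fun _ => p.2) (PySem.List.pyRange 0 10 1) ndp hnd]
    rw [List.sum_map_mul_left]
    have hN : Nfun k (j + 1) p.1.1 p.1.2 =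
        ((PySem.List.pyRange 0 10 1).map
          (fun d => Nfun k j (p.1.1 + pvBal d) (PySem.Int.mod (p.1.2 * 10 + d) k))).sum := by
      simp [Nfun]
    rw [hN]
    ring

lemma sum_map_indicator (k : Int) (l : List ((Int × Int) × Int)) (v0 : Int)
    (hnd : (l.map Prod.fst).Nodup) (hv : (((0 : Int), (0 : Int)), v0) ∈ l) :
    (l.map (fun p => p.2 * Nfun k 0 p.1.1 p.1.2)).sum = v0 := by
  induction l with
  | nil => simp at hv
  | cons p l ih =>
    simp only [List.map_cons, List.nodup_cons, List.mem_map] at hnd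
    rcases List.mem_cons.mp hv with heq | hmem
    · subst heq
      simp only [List.map_cons, List.sum_cons]
      have hz : (l.map (fun p => p.2 * Nfun k 0 p.1.1 p.1.2)).sum = 0 := by
        refine List.sum_eq_zero (fun x hx => ?_)
        simp only [List.mem_map] at hx
        obtain ⟨q, hq, rfl⟩ := hx
        have hne : q.1 ≠ ((0 : Int), (0 : Int)) := by
          intro h; exact hnd.1 ⟨q, hq, h⟩
        have : Nfun k 0 q.1.1 q.1.2 = 0 := by
          simp only [Nfun, ite_eq_right_iff]
          intro hc
          exact absurd (Prod.ext hc.1 hc.2) hne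
        rw [this, mul_zero]
      rw [hz]
      simp [Nfun]
    · have hp : p.1 ≠ ((0 : Int), (0 : Int)) := by
        intro h
        exact hnd.1 ⟨((0, 0), v0), hmem, by rw [h]⟩
      simp only [List.map_cons, List.sum_cons]
      have : Nfun k 0 p.1.1 p.1.2 = 0 := by
        simp only [Nfun, ite_eq_right_iff]
        intro hc
        exact absurd (Prod.ext hc.1 hc.2) hp
      rw [this, mul_zero, ih hnd.2 hmem]
      ring

lemma Wd_N0 (k : Int) (dp : PySem.Dict (Int × Int) Int) (hnd : dp.keys.Nodup) :
    Wd dp (fun key => Nfun k 0 key.1 key.2) = dp.getD (0, 0) 0 := by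
  unfold Wd
  have hnd' : (dp.items.map Prod.fst).Nodup := by simpa [PySem.Dict.keys] using hnd
  by_cases h : dp.contains (0, 0) = true
  · obtain ⟨v0, hv0⟩ : ∃ v0, dp.get? (0, 0) = some v0 := by
      have := PySem.Dict.contains_eq_isSome_get? (d := dp) (k := ((0 : Int), (0 : Int)))
      rw [h] at this
      exact Option.isSome_iff_exists.mp this.symm
    rw [PySem.Dict.getD_of_get?_eq_some dp 0 hv0]
    rw [sum_map_indicator k dp.items v0 hnd' (PySem.Dict.mem_items_of_get?_eq_some dp hv0)]
  · rw [PySem.Dict.getD_of_not_contains dp 0 (by simpa using h)]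
    refine List.sum_eq_zero (fun x hx => ?_)
    simp only [List.mem_map] at hx
    obtain ⟨q, hq, rfl⟩ := hx
    have hne : q.1 ≠ (0, 0) := by
      intro heq
      have : (0, 0) ∈ dp.keys := by
        have := List.mem_map_of_mem (f := Prod.fst) hq
        rw [heq] at this
        simpa [PySem.Dict.keys] using this
      rw [← PySem.Dict.contains_iff_mem_keys] at this
      exact absurd this (by simpa using h)
    have : Nfun k 0 q.1.1 q.1.2 = 0 := by
      simp only [Nfun, ite_eq_right_iff]
      intro hc
      exact absurd (Prod.ext hc.1 hc.2) hne
    rw [this, mul_zero]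

-- result read off the final sweep state (table lookup plus the tight number itself)
def outB (st : PySem.Dict (Int × Int) Int × Int × Int) : Int :=
  st.1.getD (0, 0) 0 + (if st.2.1 == 0 ∧ st.2.2 == 0 then (1 : Int) else 0)

lemma sweepB (k : Int) : ∀ (tl : List Int) (dp : PySem.Dict (Int × Int) Int) (b r : Int),
    (∀ c ∈ tl, 0 ≤ c) → dp.keys.Nodup →
    outB (tl.foldl (stepB k) (dp, b, r))
      = Wd dp (fun key => Nfun k tl.length key.1 key.2) + Sfun k tl.length
        + dfsP k tl true true b r := by
  intro tl
  induction tl with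
  | nil =>
    intro dp b r _ hnd
    simp only [List.foldl_nil, List.length_nil, outB]
    rw [Wd_N0 k dp hnd]
    simp only [Sfun, dfsP, Bool.true_and, add_zero, Bool.and_eq_true]
    rfl
  | cons c tl ih =>
    intro dp b r hdig hnd
    have h0c : 0 ≤ c := hdig c List.mem_cons_self
    have htl : ∀ x ∈ tl, 0 ≤ x := fun x hx => hdig x (List.mem_cons_of_mem c hx)
    have hnd1 : (dp.items.foldl (fun t p => (PySem.List.pyRange 0 10 1).foldl
        (fun t d => pvAdd t (p.1.1 + pvBal d, PySem.Int.mod (p.1.2 * 10 + d) k) p.2) t)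
        PySem.Dict.empty).keys.Nodup :=
      nodup_extend k dp.items PySem.Dict.empty PySem.Dict.nodup_keys_empty
    have hnd2 : (List.foldl (fun t d => pvAdd t (pvBal d, PySem.Int.mod d k) 1)
        (List.foldl (fun t p => List.foldl
            (fun t d => pvAdd t (p.1.1 + pvBal d, PySem.Int.mod (p.1.2 * 10 + d) k) p.2) t
            (PySem.List.pyRange 0 10 1))
          PySem.Dict.empty dp.items)
        (PySem.List.pyRange 1 10 1)).keys.Nodup :=
      nodup_foldl_pvAdd (PySem.List.pyRange 1 10 1) _ hnd1
    have hnd3 : (List.foldl (fun t d => pvAdd t (b + pvBal d, PySem.Int.mod (r * 10 + d) k) 1)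
        (List.foldl (fun t d => pvAdd t (pvBal d, PySem.Int.mod d k) 1)
          (List.foldl (fun t p => List.foldl
              (fun t d => pvAdd t (p.1.1 + pvBal d, PySem.Int.mod (p.1.2 * 10 + d) k) p.2) t
              (PySem.List.pyRange 0 10 1))
            PySem.Dict.empty dp.items)
          (PySem.List.pyRange 1 10 1))
        (PySem.List.pyRange 0 c 1)).keys.Nodup :=
      nodup_foldl_pvAdd (PySem.List.pyRange 0 c 1) _ hnd2
    simp only [List.foldl_cons]
    have hstep : stepB k (dp, b, r) c =
        ((List.foldl (fun t d => pvAdd t (b + pvBal d, PySem.Int.mod (r * 10 + d) k) 1)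
        (List.foldl (fun t d => pvAdd t (pvBal d, PySem.Int.mod d k) 1)
          (List.foldl (fun t p => List.foldl
              (fun t d => pvAdd t (p.1.1 + pvBal d, PySem.Int.mod (p.1.2 * 10 + d) k) p.2) t
              (PySem.List.pyRange 0 10 1))
            PySem.Dict.empty dp.items)
          (PySem.List.pyRange 1 10 1))
        (PySem.List.pyRange 0 c 1)),
         b + pvBal c, PySem.Int.mod (r * 10 + c) k) := rfl
    rw [hstep]
    rw [ih _ (b + pvBal c) (PySem.Int.mod (r * 10 + c) k) htl hnd3]
    rw [Wd_foldl_pvAdd (PySem.List.pyRange 0 c 1) _ hnd2]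
    rw [Wd_foldl_pvAdd (PySem.List.pyRange 1 10 1) _ hnd1]
    rw [Wd_extend k tl.length dp.items PySem.Dict.empty PySem.Dict.nodup_keys_empty]
    rw [Wd_empty]
    rw [dfsP_tight k c tl b r h0c]
    have hW : (dp.items.map (fun p => p.2 * Nfun k (tl.length + 1) p.1.1 p.1.2)).sum
        = Wd dp (fun key => Nfun k (tl.length + 1) key.1 key.2) := rfl
    rw [hW]
    simp only [List.length_cons, Sfun, one_mul]
    ring

lemma tdc_chars : ∀ (fuel n : Nat) (ds : List Char) (c : Char),
    c ∈ Nat.toDigitsCore 10 fuel n ds → c ∈ ds ∨ ∃ m, m < 10 ∧ c = Nat.digitChar m := by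
  intro fuel
  induction fuel with
  | zero => intro n ds c hc; simp [Nat.toDigitsCore] at hc; exact Or.inl hc
  | succ fuel ih =>
    intro n ds c hc
    simp only [Nat.toDigitsCore] at hc
    split at hc
    · rcases List.mem_cons.mp hc with h | h
      · exact Or.inr ⟨n % 10, Nat.mod_lt _ (by norm_num), h⟩
      · exact Or.inl h
    · rcases ih _ _ _ hc with h | h
      · rcases List.mem_cons.mp h with h' | h'
        · exact Or.inr ⟨n % 10, Nat.mod_lt _ (by norm_num), h'⟩
        · exact Or.inl h'
      · exact Or.inr h

lemma tdc_head : ∀ (fuel n : Nat) (ds : List Char), 0 < n → n < 10 ^ fuel →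
    ∃ m t, 0 < m ∧ m < 10 ∧ Nat.toDigitsCore 10 fuel n ds = Nat.digitChar m :: t := by
  intro fuel
  induction fuel with
  | zero => intro n ds h1 h2; simp at h2; omega
  | succ fuel ih =>
    intro n ds h1 h2
    simp only [Nat.toDigitsCore]
    split
    · next hdiv =>
      refine ⟨n % 10, ds, ?_, Nat.mod_lt _ (by norm_num), rfl⟩
      have : n < 10 := Nat.lt_of_div_eq_zero (by norm_num) hdiv
      omega
    · next hdiv =>
      exact ih (n / 10) _ (Nat.pos_of_ne_zero hdiv) (by rw [pow_succ] at h2; omega)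

lemma pvDigit_digitChar (m : Nat) (h : m < 10) : pvDigit (Nat.digitChar m) = (m : Int) := by
  interval_cases m <;> rfl

lemma digits_pos (num : Int) (h : 1 ≤ num) :
    ∃ c0 tl, pvDigits num = c0 :: tl ∧ 1 ≤ c0 ∧ ∀ d ∈ tl, 0 ≤ d := by
  unfold pvDigits PySem.Int.toChars
  rw [if_neg (by omega)]
  unfold Nat.toDigits
  have hn : 0 < num.toNat := by omega
  have hlt : num.toNat < 10 ^ (num.toNat + 1) :=
    lt_of_lt_of_le (Nat.lt_pow_self (by norm_num)) (Nat.pow_le_pow_right (by norm_num) (by omega))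
  obtain ⟨m, t, hm0, hm10, heq⟩ := tdc_head (num.toNat + 1) num.toNat [] hn hlt
  refine ⟨(m : Int), t.map pvDigit, ?_, ?_, ?_⟩
  · rw [heq]; simp [pvDigit_digitChar m hm10]
  · omega
  · intro d hd
    simp only [List.mem_map] at hd
    obtain ⟨c, hc, rfl⟩ := hd
    have hmem : c ∈ Nat.toDigitsCore 10 (num.toNat + 1) num.toNat [] := by
      rw [heq]; exact List.mem_cons_of_mem _ hc
    rcases tdc_chars _ _ _ _ hmem with h' | ⟨m', hm', rfl⟩
    · simp at h'
    · rw [pvDigit_digitChar m' hm']; omega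

lemma checkAB (k num : Int) (h : 0 ≤ num) : checkA k num = checkB k num := by
  rcases eq_or_lt_of_le h with h0 | hpos
  · have hdig : pvDigits 0 = [0] := by decide
    rw [← h0]
    rw [checkA_eq_dfsP]
    unfold checkB
    rw [hdig]
    simp only [dfsP]
    norm_num [PySem.List.pyRange_one_eq_nil]
  · have h1 : 1 ≤ num := hpos
    obtain ⟨c0, tl, hdig, hc0, htl⟩ := digits_pos num h1
    have hnd0 : (List.foldl (fun t d => pvAdd t (pvBal d, PySem.Int.mod d k) 1)
        PySem.Dict.empty (PySem.List.pyRange 1 c0 1)).keys.Nodup :=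
      nodup_foldl_pvAdd (PySem.List.pyRange 1 c0 1) _ PySem.Dict.nodup_keys_empty
    rw [checkA_eq_dfsP]
    unfold checkB
    rw [if_neg (by simp; omega), hdig]
    simp only []
    have hsplit : ∀ (st : PySem.Dict (Int × Int) Int × Int × Int),
        (if st.2.1 == 0 && st.2.2 == 0 then st.1.getD (0, 0) 0 + 1 else st.1.getD (0, 0) 0)
          = outB st := by
      intro st
      unfold outB
      rcases hb : st.2.1 == 0 <;> rcases hr : st.2.2 == 0 <;> simp_all
    rw [hsplit]
    rw [sweepB k tl _ (pvBal c0) (PySem.Int.mod c0 k) htl hnd0]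
    rw [Wd_foldl_pvAdd (PySem.List.pyRange 1 c0 1) PySem.Dict.empty
        PySem.Dict.nodup_keys_empty]
    rw [Wd_empty]
    rw [dfsP_top k c0 tl hc0]
    simp only [one_mul]
    ring

-- ===== VERDICT (by name: the statement is the Claim_ definition above) =====
theorem lc_2827_1_spec : Claim_equal_lc_2827_1 := by
  intro low high k hdom hpre
  unfold Spec_lc_2827_1 lc_2827_1 lc_2827_1_alt
  rw [checkAB k high hpre.2.1, checkAB k (low - 1) (by have := hpre.1; omega)]
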